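-- pv_equiv track=rewrite | github.com/isergey/chel | libcms/apps/sso_opac/subscription.py | _get_cleaned_bbk
-- ===== SOURCE A (Python) =====
-- def _get_cleaned_bbk(bbk_data: str):
--     bbk_parts = []
--
--     for c in bbk_data:
--         if c in ['.', '(']:
--             break
--         else:
--             bbk_parts.append(c)
--
--     return ''.join(bbk_parts).strip()
-- ===== SOURCE B (Python) =====
-- def _get_cleaned_bbk(bbk_data: str):
--     candidates = [i for i in (bbk_data.find('.'), bbk_data.find('(')) if i != -1]
--     cut = min(candidates) if candidates else len(bbk_data)
--     return bbk_data[:cut].strip()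
-- ===== Notes on version B (the rewrite author's own statement) =====
-- stated objective: simpler
-- what changed: Replaced the char-by-char break-loop that accumulates a prefix list with computing the first delimiter position via str.find and returning a single stripped slice.
import Mathlib
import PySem

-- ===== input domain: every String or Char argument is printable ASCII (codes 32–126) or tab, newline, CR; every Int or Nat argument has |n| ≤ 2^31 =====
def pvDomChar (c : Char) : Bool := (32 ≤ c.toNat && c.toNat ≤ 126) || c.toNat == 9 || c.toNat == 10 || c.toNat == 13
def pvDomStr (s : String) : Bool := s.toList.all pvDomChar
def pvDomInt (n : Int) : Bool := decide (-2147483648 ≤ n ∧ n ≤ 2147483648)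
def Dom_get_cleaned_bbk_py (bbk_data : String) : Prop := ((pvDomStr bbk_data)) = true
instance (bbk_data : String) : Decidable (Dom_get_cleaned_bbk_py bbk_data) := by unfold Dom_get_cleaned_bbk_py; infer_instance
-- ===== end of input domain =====

-- B replaces A's char-accumulating break-loop by computing the first delimiter index with str.find
-- and returning one stripped slice (objective: simpler).

-- ===== PORT A =====
-- the for-loop with break: accumulate chars until '.' or '(' is seen
def pvBbkLoop (acc : List Char) : List Char → List Char
  | [] => acc
  | c :: rest => if ['.', '('].contains c then acc else pvBbkLoop (acc ++ [c]) rest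

def get_cleaned_bbk_py (bbk_data : String) : String :=
  PySem.Str.strip (String.ofList (pvBbkLoop [] bbk_data.toList))

-- ===== PORT B =====
def get_cleaned_bbk_py_alt (bbk_data : String) : String :=
  let candidates := [PySem.Str.find bbk_data ".", PySem.Str.find bbk_data "("].filter (fun i => i != -1)
  let cut : Int :=
    match PySem.List.min? candidates id with
    | some m => m
    | none => PySem.Str.len bbk_data
  PySem.Str.strip (PySem.Str.slice bbk_data none (some cut))

-- ===== PRECONDITION & SPEC =====
def Spec_get_cleaned_bbk_py (bbk_data : String) (out : String) : Prop := out = get_cleaned_bbk_py_alt bbk_data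
instance (bbk_data : String) (out : String) : Decidable (Spec_get_cleaned_bbk_py bbk_data out) := by unfold Spec_get_cleaned_bbk_py; infer_instance

-- ===== CLAIM (what is proved, stated in full; the proofs are below) =====
def Claim_equal_get_cleaned_bbk_py : Prop := ∀ (bbk_data : String), Dom_get_cleaned_bbk_py bbk_data → Spec_get_cleaned_bbk_py bbk_data (get_cleaned_bbk_py bbk_data)

-- ===== LEMMAS AND PROOFS =====

-- A's loop is takeWhile of the complement of the delimiter test
lemma pvBbkLoop_eq (l : List Char) : ∀ acc : List Char,
    pvBbkLoop acc l = acc ++ l.takeWhile (fun c => !(c == '.' || c == '(')) := by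
  induction l with
  | nil => intro acc; simp [pvBbkLoop]
  | cons c rest ih =>
    intro acc
    rw [pvBbkLoop]
    by_cases h : (c == '.' || c == '(') = true
    · rw [if_pos (by simpa [List.contains_cons] using h)]
      rw [List.takeWhile_cons, if_neg (by simp [h])]
      simp
    · rw [if_neg (by simpa [List.contains_cons] using h)]
      rw [List.takeWhile_cons, if_pos (by simp [h]), ih]
      simp

lemma pvSingleton_prefix_iff (c : Char) (t : List Char) : [c] <+: t ↔ t.head? = some c := by
  cases t with
  | nil => simp
  | cons b r => simp [List.cons_prefix_cons, eq_comm]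

-- characterisation of find on a one-char needle: position of the first occurrence
lemma pvFind_singleton_spec (l : List Char) (c : Char) (h : PySem.Chars.find l [c] ≠ -1) :
    l[(PySem.Chars.find l [c]).toNat]? = some c ∧
    ∀ i : Nat, l[i]? = some c → (PySem.Chars.find l [c]).toNat ≤ i := by
  have hnn : 0 ≤ PySem.Chars.find l [c] :=
    (PySem.Chars.find_nonneg_iff l [c]).mpr ((PySem.Chars.find_ne_neg_one_iff l [c]).mp h)
  obtain ⟨hpre, hmin⟩ := PySem.Chars.find_spec hnn
  refine ⟨by simpa [List.head?_drop] using (pvSingleton_prefix_iff c _).mp hpre, ?_⟩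
  intro i hi
  by_contra hlt
  exact hmin i (by omega) ((pvSingleton_prefix_iff c _).mpr (by simpa [List.head?_drop] using hi))

-- the first index satisfying q is at most any index holding a q-char
lemma pvFindIdx_le (q : Char → Bool) (l : List Char) (c : Char) (i : Nat)
    (h : l[i]? = some c) (hq : q c = true) : l.findIdx q ≤ i := by
  by_contra h'
  have h'' : i < l.findIdx q := Nat.lt_of_not_le h'
  have hi : i < l.length := (List.getElem?_eq_some_iff.mp h).1
  have hfalse := List.not_of_lt_findIdx h''
  have h2 : l[i]'hi = c := by simpa [List.getElem?_eq_getElem hi] using h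
  have hc : q c = false := by rw [← h2]; exact hfalse
  rw [hq] at hc
  exact Bool.true_eq_false.mp hc

-- the cut index B computes is exactly the first delimiter index
lemma pvCut_eq_findIdx (l : List Char) :
    (match PySem.List.min?
        ([PySem.Chars.find l ['.'], PySem.Chars.find l ['(']].filter (fun i => i != -1)) id with
      | some m => m
      | none => (l.length : Int)) = (l.findIdx (fun c => c == '.' || c == '(') : Int) := by
  set q : Char → Bool := fun c => c == '.' || c == '(' with hq
  by_cases hd : PySem.Chars.find l ['.'] = -1 <;> by_cases hp : PySem.Chars.find l ['('] = -1
  · -- neither delimiter occurs: cut = len, findIdx = len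
    have hdm : '.' ∉ l := by
      have := (PySem.Chars.find_eq_neg_one_iff l ['.']).mp hd
      simpa [List.singleton_infix_iff] using this
    have hpm : '(' ∉ l := by
      have := (PySem.Chars.find_eq_neg_one_iff l ['(']).mp hp
      simpa [List.singleton_infix_iff] using this
    have hlen : l.findIdx q = l.length := by
      apply List.findIdx_eq_length.mpr
      intro x hx
      have h1 : x ≠ '.' := fun h => hdm (h ▸ hx)
      have h2 : x ≠ '(' := fun h => hpm (h ▸ hx)
      simp [hq, h1, h2]
    have hd' : (PySem.Chars.find l ['.'] != -1) = false := by simp [hd]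
    have hp' : (PySem.Chars.find l ['('] != -1) = false := by simp [hp]
    simp [hd', hp', PySem.List.min?, List.filter, hlen]
  · -- only '(' occurs
    obtain ⟨hget, hmin⟩ := pvFind_singleton_spec l '(' hp
    have hk1 : l.findIdx q ≤ (PySem.Chars.find l ['(']).toNat :=
      pvFindIdx_le q l '(' _ hget (by simp [hq])
    have hklen : l.findIdx q < l.length := lt_of_le_of_lt hk1 (List.getElem?_eq_some_iff.mp hget).1
    have hqk : q l[l.findIdx q] = true := List.findIdx_getElem
    have hqk' : l[l.findIdx q]'hklen = '.' ∨ l[l.findIdx q]'hklen = '(' := by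
      simpa [hq] using hqk
    have hkc : l[l.findIdx q]'hklen = '(' := by
      rcases hqk' with h1 | h1
      · exfalso
        have hmem : '.' ∈ l := h1 ▸ List.getElem_mem hklen
        have := (PySem.Chars.find_eq_neg_one_iff l ['.']).mp hd
        simp [List.singleton_infix_iff] at this
        exact this hmem
      · exact h1
    have hk2 : (PySem.Chars.find l ['(']).toNat ≤ l.findIdx q :=
      hmin _ (by simp [List.getElem?_eq_getElem hklen, hkc])
    have hnn : 0 ≤ PySem.Chars.find l ['('] :=
      (PySem.Chars.find_nonneg_iff l ['(']).mpr ((PySem.Chars.find_ne_neg_one_iff l ['(']).mp hp)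
    have hd' : (PySem.Chars.find l ['.'] != -1) = false := by simp [hd]
    have hp' : (PySem.Chars.find l ['('] != -1) = true := by simpa using hp
    simp only [hd', hp', List.filter, PySem.List.min?, List.foldl, id]
    show PySem.Chars.find l ['('] = ((l.findIdx q : Nat) : Int)
    omega
  · -- only '.' occurs
    obtain ⟨hget, hmin⟩ := pvFind_singleton_spec l '.' hd
    have hk1 : l.findIdx q ≤ (PySem.Chars.find l ['.']).toNat :=
      pvFindIdx_le q l '.' _ hget (by simp [hq])
    have hklen : l.findIdx q < l.length := lt_of_le_of_lt hk1 (List.getElem?_eq_some_iff.mp hget).1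
    have hqk : q l[l.findIdx q] = true := List.findIdx_getElem
    have hqk' : l[l.findIdx q]'hklen = '.' ∨ l[l.findIdx q]'hklen = '(' := by
      simpa [hq] using hqk
    have hkc : l[l.findIdx q]'hklen = '.' := by
      rcases hqk' with h1 | h1
      · exact h1
      · exfalso
        have hmem : '(' ∈ l := h1 ▸ List.getElem_mem hklen
        have := (PySem.Chars.find_eq_neg_one_iff l ['(']).mp hp
        simp [List.singleton_infix_iff] at this
        exact this hmem
    have hk2 : (PySem.Chars.find l ['.']).toNat ≤ l.findIdx q :=
      hmin _ (by simp [List.getElem?_eq_getElem hklen, hkc])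
    have hnn : 0 ≤ PySem.Chars.find l ['.'] :=
      (PySem.Chars.find_nonneg_iff l ['.']).mpr ((PySem.Chars.find_ne_neg_one_iff l ['.']).mp hd)
    have hd' : (PySem.Chars.find l ['.'] != -1) = true := by simpa using hd
    have hp' : (PySem.Chars.find l ['('] != -1) = false := by simp [hp]
    simp only [hd', hp', List.filter, PySem.List.min?, List.foldl, id]
    show PySem.Chars.find l ['.'] = ((l.findIdx q : Nat) : Int)
    omega
  · -- both occur: B takes the smaller of the two positions
    obtain ⟨hgetd, hmind⟩ := pvFind_singleton_spec l '.' hd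
    obtain ⟨hgetp, hminp⟩ := pvFind_singleton_spec l '(' hp
    have hk1 : l.findIdx q ≤ (PySem.Chars.find l ['.']).toNat :=
      pvFindIdx_le q l '.' _ hgetd (by simp [hq])
    have hk2 : l.findIdx q ≤ (PySem.Chars.find l ['(']).toNat :=
      pvFindIdx_le q l '(' _ hgetp (by simp [hq])
    have hklen : l.findIdx q < l.length := lt_of_le_of_lt hk1 (List.getElem?_eq_some_iff.mp hgetd).1
    have hqk : q l[l.findIdx q] = true := List.findIdx_getElem
    have hqk' : l[l.findIdx q]'hklen = '.' ∨ l[l.findIdx q]'hklen = '(' := by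
      simpa [hq] using hqk
    have hk3 : (PySem.Chars.find l ['.']).toNat ≤ l.findIdx q ∨
        (PySem.Chars.find l ['(']).toNat ≤ l.findIdx q := by
      rcases hqk' with h1 | h1
      · exact Or.inl (hmind _ (by simp [List.getElem?_eq_getElem hklen, h1]))
      · exact Or.inr (hminp _ (by simp [List.getElem?_eq_getElem hklen, h1]))
    have hnnd : 0 ≤ PySem.Chars.find l ['.'] :=
      (PySem.Chars.find_nonneg_iff l ['.']).mpr ((PySem.Chars.find_ne_neg_one_iff l ['.']).mp hd)
    have hnnp : 0 ≤ PySem.Chars.find l ['('] :=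
      (PySem.Chars.find_nonneg_iff l ['(']).mpr ((PySem.Chars.find_ne_neg_one_iff l ['(']).mp hp)
    have hd' : (PySem.Chars.find l ['.'] != -1) = true := by simpa using hd
    have hp' : (PySem.Chars.find l ['('] != -1) = true := by simpa using hp
    simp only [hd', hp', List.filter, PySem.List.min?, List.foldl, id]
    split_ifs with hlt
    · show PySem.Chars.find l ['('] = ((l.findIdx q : Nat) : Int)
      omega
    · show PySem.Chars.find l ['.'] = ((l.findIdx q : Nat) : Int)
      omega

theorem pv_main (s : String) : get_cleaned_bbk_py s = get_cleaned_bbk_py_alt s := by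
  apply String.toList_inj.mp
  unfold get_cleaned_bbk_py get_cleaned_bbk_py_alt
  simp only [PySem.Str.toList_strip, PySem.Str.toList_slice, String.toList_ofList,
    PySem.Str.find_eq, PySem.Str.len_eq]
  congr 1
  have hdot : (".":String).toList = ['.'] := rfl
  have hpar : ("(":String).toList = ['('] := rfl
  rw [hdot, hpar, pvCut_eq_findIdx s.toList, pvBbkLoop_eq, List.nil_append]
  have hslice : PySem.Chars.slice s.toList none
      (some ((List.findIdx (fun c => c == '.' || c == '(') s.toList : Nat) : Int)) =
      s.toList.take (List.findIdx (fun c => c == '.' || c == '(') s.toList) :=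
    PySem.List.slice_to_natCast s.toList _
  rw [hslice, List.takeWhile_eq_take_findIdx_not]
  simp only [Bool.not_not]

-- ===== VERDICT (by name: the statement is the Claim_ definition above) =====
theorem get_cleaned_bbk_py_spec : Claim_equal_get_cleaned_bbk_py := by
  intro s _
  unfold Spec_get_cleaned_bbk_py
  exact pv_main s
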